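-- pv_equiv track=rewrite | github.com/lawrenceamadi/RaadNet | tf_neural_net/commons.py | zone_index_metadata
-- ===== SOURCE A (Python) =====
-- def zone_index_metadata(zone_names, zone_frames):
--     zone_index_meta = dict()
--     s_idx = 0
--     for i, zone_name in enumerate(zone_names):
--         n_zone_imgs = len(zone_frames[zone_name])
--         e_idx = s_idx + n_zone_imgs
--         zone_index_meta[zone_name] = (i, s_idx, e_idx)
--         s_idx = e_idx
--     return zone_index_meta
-- ===== SOURCE B (Python) =====
-- def zone_index_metadata(zone_names, zone_frames):
--     lengths = [len(zone_frames[z]) for z in zone_names]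
--     offsets = [0]
--     for n in lengths:
--         offsets.append(offsets[-1] + n)
--     meta = {}
--     for i, (z, (s, e)) in enumerate(zip(zone_names, zip(offsets, offsets[1:]))):
--         meta[z] = (i, s, e)
--     return meta
-- ===== Notes on version B (the rewrite author's own statement) =====
-- stated objective: alternative
-- what changed: Replaces the fused running-sum dict loop with a separately built prefix-offset table that is then zipped against the zone names in a second pairing pass.
import Mathlib
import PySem

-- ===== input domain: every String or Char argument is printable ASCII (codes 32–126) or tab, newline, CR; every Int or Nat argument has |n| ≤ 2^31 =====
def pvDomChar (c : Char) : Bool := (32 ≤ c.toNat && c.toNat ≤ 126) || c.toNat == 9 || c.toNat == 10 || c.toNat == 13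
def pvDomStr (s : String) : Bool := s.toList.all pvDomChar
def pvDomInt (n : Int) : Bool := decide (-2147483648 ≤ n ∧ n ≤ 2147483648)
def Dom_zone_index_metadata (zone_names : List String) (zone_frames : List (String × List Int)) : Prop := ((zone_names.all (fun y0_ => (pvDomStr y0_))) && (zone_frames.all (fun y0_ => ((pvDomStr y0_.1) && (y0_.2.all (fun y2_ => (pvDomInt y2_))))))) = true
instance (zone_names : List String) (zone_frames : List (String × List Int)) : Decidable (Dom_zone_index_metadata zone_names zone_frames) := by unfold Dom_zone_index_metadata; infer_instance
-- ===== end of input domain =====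

-- B replaces A's fused running-sum dict loop by a prefix-offset table plus a separate zip pairing pass (alternative decomposition, same cost).

-- ===== PORT A =====
-- literal transliteration of A: one loop over enumerate(zone_names) carrying (dict, s_idx)
def zone_index_metadata (zone_names : List String) (zone_frames : List (String × List Int)) : List (String × Int × Int × Int) :=
  let zf := PySem.Dict.mk zone_frames
  (((PySem.List.enumerate zone_names 0).foldl
      (fun (st : PySem.Dict String (Int × Int × Int) × Int) p =>
        let n_zone_imgs : Int := (zf.getD p.2 []).length
        let e_idx := st.2 + n_zone_imgs
        (st.1.insert p.2 (p.1, st.2, e_idx), e_idx))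
      (PySem.Dict.empty, 0)).1).items

-- ===== PORT B =====
-- literal transliteration of Source B: lengths list, offsets prefix table, then a zip pairing pass
def zone_index_metadata_alt (zone_names : List String) (zone_frames : List (String × List Int)) : List (String × Int × Int × Int) :=
  let zf := PySem.Dict.mk zone_frames
  let lengths : List Int := zone_names.map (fun z => ((zf.getD z []).length : Int))
  let offsets : List Int := lengths.foldl (fun acc n => acc ++ [acc.getLast?.getD 0 + n]) [0]
  ((PySem.List.enumerate (zone_names.zip (offsets.zip (offsets.drop 1))) 0).foldl
      (fun (d : PySem.Dict String (Int × Int × Int)) p =>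
        d.insert p.2.1 (p.1, p.2.2.1, p.2.2.2))
      PySem.Dict.empty).items

-- ===== PRECONDITION & SPEC =====
-- Pre_ excludes exactly the inputs where A raises KeyError: some zone name has no entry in zone_frames (B raises there too).
def Pre_zone_index_metadata (zone_names : List String) (zone_frames : List (String × List Int)) : Prop :=
  ∀ z ∈ zone_names, z ∈ zone_frames.map Prod.fst
instance (zone_names : List String) (zone_frames : List (String × List Int)) : Decidable (Pre_zone_index_metadata zone_names zone_frames) := by unfold Pre_zone_index_metadata; infer_instance
def pvWitness_zone_index_metadata : List String × (List (String × List Int)) :=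
  (["a", "b"], [("a", [1, 2]), ("b", [3])])
def Spec_zone_index_metadata (zone_names : List String) (zone_frames : List (String × List Int)) (out : List (String × Int × Int × Int)) : Prop := out = zone_index_metadata_alt zone_names zone_frames
instance (zone_names : List String) (zone_frames : List (String × List Int)) (out : List (String × Int × Int × Int)) : Decidable (Spec_zone_index_metadata zone_names zone_frames out) := by unfold Spec_zone_index_metadata; infer_instance

-- ===== CLAIM (what is proved, stated in full; the proofs are below) =====
def Claim_equal_zone_index_metadata : Prop := ∀ (zone_names : List String) (zone_frames : List (String × List Int)), Dom_zone_index_metadata zone_names zone_frames → Pre_zone_index_metadata zone_names zone_frames → Spec_zone_index_metadata zone_names zone_frames (zone_index_metadata zone_names zone_frames)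

-- ===== LEMMAS AND PROOFS =====

-- running prefix sums: scan s [n0, n1, …] = [s+n0, s+n0+n1, …]
def pvScan (s : Int) : List Int → List Int
  | [] => []
  | n :: ns => (s + n) :: pvScan (s + n) ns

-- B's offsets-building loop appends the running prefix sums
theorem pv_offsets_eq (ls : List Int) (acc : List Int) (s : Int)
    (h : acc.getLast? = some s) :
    ls.foldl (fun acc n => acc ++ [acc.getLast?.getD 0 + n]) acc = acc ++ pvScan s ls := by
  induction ls generalizing acc s with
  | nil => simp [pvScan]
  | cons n ns ih =>
    simp only [List.foldl_cons, pvScan, h, Option.getD_some]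
    rw [ih (acc ++ [s + n]) (s + n) (by simp)]
    simp

-- the two folds agree for any start index, start offset and start dict
theorem pv_main (names : List String) (zf : PySem.Dict String (List Int))
    (i s : Int) (d : PySem.Dict String (Int × Int × Int)) :
    ((PySem.List.enumerate names i).foldl
        (fun (st : PySem.Dict String (Int × Int × Int) × Int) p =>
          let n : Int := (zf.getD p.2 []).length
          let e := st.2 + n
          (st.1.insert p.2 (p.1, st.2, e), e)) (d, s)).1
    = (PySem.List.enumerate
          (names.zip ((s :: pvScan s (names.map (fun z => ((zf.getD z []).length : Int)))).zip
                      (pvScan s (names.map (fun z => ((zf.getD z []).length : Int)))))) i).foldl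
        (fun (d : PySem.Dict String (Int × Int × Int)) p =>
          d.insert p.2.1 (p.1, p.2.2.1, p.2.2.2)) d := by
  induction names generalizing i s d with
  | nil => simp [PySem.List.enumerate_nil, pvScan]
  | cons z rest ih =>
    simp only [List.map_cons, pvScan, List.zip_cons_cons,
      PySem.List.enumerate_cons, List.foldl_cons]
    exact ih (i + 1) (s + (zf.getD z []).length) _

-- ===== VERDICT (by name: the statement is the Claim_ definition above) =====
theorem zone_index_metadata_spec : Claim_equal_zone_index_metadata := by
  intro zone_names zone_frames _ _
  unfold Spec_zone_index_metadata zone_index_metadata zone_index_metadata_alt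
  simp only [pv_offsets_eq _ [0] 0 rfl, List.cons_append, List.nil_append, List.drop_succ_cons,
    List.drop_zero]
  rw [pv_main zone_names { items := zone_frames } 0 0 PySem.Dict.empty]
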